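-- pv_equiv track=rewrite | github.com/sun-hainan/Python | 70_算法统计/vc_dimension.py | can_shatter
-- ===== SOURCE A (Python) =====
-- import itertools
-- from typing import List, Set
--
-- def can_shatter(points: List) -> bool:
--
--     """
--
--     检查是否能shatter点集
--
--
--
--     返回：是否能shatter
--
--     """
--
--     n = len(points)
--
--
--
--     # 尝试所有2^n种二分类
--
--     for labeling in itertools.product([0, 1], repeat=n):
--
--         # 寻找匹配的假设
--
--         found = False
--
--
--
--         # 生成所有可能的假设（简化版）
--
--         for threshold in [-1, 0, 1]:
--
--             hypothesis = lambda x: 1 if x[0] > threshold else 0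
--
--
--
--             # 检查是否匹配
--
--             matches = all(hypothesis(p) == label
--
--                         for p, label in zip(points, labeling))
--
--
--
--             if matches:
--
--                 found = True
--
--                 break
--
--
--
--         if not found:
--
--             return False
--
--
--
--     return True
-- ===== SOURCE B (Python) =====
-- def can_shatter(points):
--     """Only 3 thresholds exist, so at most 3 labelings are realizable;
--     shattering needs all 2^n labelings, hence n <= 1, checked directly."""
--     if len(points) >= 2:
--         return False
--     if not points:
--         return True
--     x = points[0][0]
--     return 0 <= x <= 1
-- ===== Notes on version B (the rewrite author's own statement) =====
-- stated objective: simpler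
-- what changed: Instead of enumerating all 2^n labelings and scanning the 3 thresholds for each, B uses that 3 hypotheses realize at most 3 labelings, so shattering holds iff n=0, or n=1 with 0 <= points[0][0] <= 1 (A's early return makes it fast in practice too, so no speed is claimed).
import Mathlib
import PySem

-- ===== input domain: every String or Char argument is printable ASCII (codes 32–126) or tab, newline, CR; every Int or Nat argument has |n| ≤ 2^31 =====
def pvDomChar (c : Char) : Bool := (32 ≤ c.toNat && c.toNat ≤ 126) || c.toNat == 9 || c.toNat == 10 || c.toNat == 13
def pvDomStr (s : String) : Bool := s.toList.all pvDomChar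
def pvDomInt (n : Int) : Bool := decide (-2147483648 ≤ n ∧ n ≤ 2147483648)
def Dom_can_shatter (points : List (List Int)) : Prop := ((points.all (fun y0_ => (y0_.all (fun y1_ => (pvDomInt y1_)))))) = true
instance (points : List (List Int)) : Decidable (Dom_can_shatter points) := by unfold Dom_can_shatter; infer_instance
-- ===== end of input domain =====

-- B replaces A's 2^n labeling enumeration by the closed-form condition (n ≤ 1, and for n = 1
-- that both labels 0 and 1 are realizable, i.e. 0 ≤ points[0][0] ≤ 1); return value only.

-- ===== PORT A =====
-- hypothesis = lambda x: 1 if x[0] > threshold else 0   (x[0] total via getD; Pre_ excludes empty points)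
def pvHyp (t : Int) (p : List Int) : Int :=
  if ((PySem.List.pyGet? p 0).getD 0) > t then 1 else 0

-- matches = all(hypothesis(p) == label for p, label in zip(points, labeling))
def pvMatches (points : List (List Int)) (lab : List Int) (t : Int) : Bool :=
  (points.zip lab).all (fun pl => pvHyp t pl.1 == pl.2)

-- the inner 'for threshold in [-1, 0, 1]' loop with break (found)
def pvFound (points : List (List Int)) (lab : List Int) : Bool :=
  ([-1, 0, 1] : List Int).any (fun t => pvMatches points lab t)

-- itertools.product([0, 1], repeat=n), in Python's order (leftmost varies slowest)
def pvProduct01 : Nat → List (List Int)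
  | 0 => [[]]
  | n+1 => ([0, 1] : List Int).flatMap (fun x => (pvProduct01 n).map (fun rest => x :: rest))

-- the outer labeling loop with early 'return False'
def can_shatter (points : List (List Int)) : Bool :=
  (pvProduct01 points.length).all (fun lab => pvFound points lab)

-- ===== PORT B =====
def can_shatter_alt (points : List (List Int)) : Bool :=
  match points with
  | _ :: _ :: _ => false
  | [] => true
  | [p] => decide (0 ≤ (PySem.List.pyGet? p 0).getD 0 ∧ (PySem.List.pyGet? p 0).getD 0 ≤ 1)

-- ===== PRECONDITION & SPEC =====
-- Pre_ excludes exactly the inputs on which A raises IndexError: those containing an empty point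
-- unless (with ≥ 2 points) some point before the first empty one has head > 1, in which case A's
-- scan mismatches every threshold before indexing the empty point and returns False.
def Pre_can_shatter (points : List (List Int)) : Prop :=
  (∀ p ∈ points, p ≠ []) ∨
  (2 ≤ points.length ∧ ∃ p ∈ points.takeWhile (fun q => !q.isEmpty), 1 < p.headD 0)
instance (points : List (List Int)) : Decidable (Pre_can_shatter points) := by
  unfold Pre_can_shatter; infer_instance

def pvWitness_can_shatter : List (List Int) := [[0], [1]]

def Spec_can_shatter (points : List (List Int)) (out : Bool) : Prop := out = can_shatter_alt points
instance (points : List (List Int)) (out : Bool) : Decidable (Spec_can_shatter points out) := by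
  unfold Spec_can_shatter; infer_instance

-- ===== CLAIM (what is proved, stated in full; the proofs are below) =====
def Claim_equal_can_shatter : Prop := ∀ (points : List (List Int)), Dom_can_shatter points → Pre_can_shatter points → Spec_can_shatter points (can_shatter points)

-- ===== LEMMAS AND PROOFS =====

lemma pvHyp_zero_or_one (t : Int) (p : List Int) : pvHyp t p = 0 ∨ pvHyp t p = 1 := by
  unfold pvHyp; split <;> simp

-- membership in the labeling enumeration
lemma mem_pvProduct01 (lab : List Int) (h01 : ∀ x ∈ lab, x = 0 ∨ x = 1) :
    lab ∈ pvProduct01 lab.length := by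
  induction lab with
  | nil => simp [pvProduct01]
  | cons a l ih =>
    have ha := h01 a (by simp)
    have hl := ih (fun x hx => h01 x (by simp [hx]))
    simp only [List.length_cons, pvProduct01, List.mem_flatMap, List.mem_map]
    rcases ha with ha | ha <;> subst ha
    · exact ⟨0, by simp, l, hl, rfl⟩
    · exact ⟨1, by simp, l, hl, rfl⟩

-- matches ↔ the labeling equals the one induced by the threshold (lengths equal)
lemma pvMatches_iff (points : List (List Int)) (lab : List Int) (t : Int)
    (h : lab.length = points.length) :
    pvMatches points lab t = true ↔ lab = points.map (pvHyp t) := by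
  induction points generalizing lab with
  | nil =>
    cases lab with
    | nil => simp [pvMatches]
    | cons a l => simp at h
  | cons p ps ih =>
    cases lab with
    | nil => simp at h
    | cons a l =>
      simp only [List.length_cons, Nat.add_right_cancel_iff] at h
      simp [pvMatches, List.zip_cons_cons, eq_comm (a := pvHyp t p)]
      intro _
      simpa [pvMatches] using ih l h

lemma pvFound_elim (points : List (List Int)) (lab : List Int)
    (hlen : lab.length = points.length) (h : pvFound points lab = true) :
    ∃ t ∈ ([-1, 0, 1] : List Int), lab = points.map (pvHyp t) := by
  unfold pvFound at h
  rw [List.any_eq_true] at h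
  obtain ⟨t, ht, hm⟩ := h
  exact ⟨t, ht, (pvMatches_iff points lab t hlen).mp hm⟩

-- n ≥ 2: A returns false
lemma can_shatter_two (p q : List Int) (rest : List (List Int)) :
    can_shatter (p :: q :: rest) = false := by
  by_contra hne
  have htrue : can_shatter (p :: q :: rest) = true := by
    cases h : can_shatter (p :: q :: rest)
    · exact absurd h hne
    · rfl
  unfold can_shatter at htrue
  rw [List.all_eq_true] at htrue
  set tail := rest.map (pvHyp 1) with htail
  have htl : tail.length = rest.length := by simp [htail]
  have h01tail : ∀ x ∈ tail, x = 0 ∨ x = 1 := by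
    intro x hx
    simp only [htail, List.mem_map] at hx
    obtain ⟨r, _, hr⟩ := hx
    exact hr ▸ pvHyp_zero_or_one 1 r
  -- the labelings 0::1::tail and 1::0::tail are both in the enumeration
  have hm1 : (0 :: 1 :: tail) ∈ pvProduct01 (p :: q :: rest).length := by
    have := mem_pvProduct01 (0 :: 1 :: tail) (by
      intro x hx; simp at hx
      rcases hx with h | h | h
      · exact Or.inl h
      · exact Or.inr h
      · exact h01tail x h)
    simpa [htl] using this
  have hm2 : (1 :: 0 :: tail) ∈ pvProduct01 (p :: q :: rest).length := by
    have := mem_pvProduct01 (1 :: 0 :: tail) (by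
      intro x hx; simp at hx
      rcases hx with h | h | h
      · exact Or.inr h
      · exact Or.inl h
      · exact h01tail x h)
    simpa [htl] using this
  have hf1 := htrue _ hm1
  have hf2 := htrue _ hm2
  obtain ⟨t1, _, he1⟩ := pvFound_elim _ _ (by simp [htl]) hf1
  obtain ⟨t2, _, he2⟩ := pvFound_elim _ _ (by simp [htl]) hf2
  simp only [List.map_cons, List.cons.injEq] at he1 he2
  -- extract the first two coordinates
  have h1a : pvHyp t1 p = 0 := he1.1.symm
  have h1b : pvHyp t1 q = 1 := he1.2.1.symm
  have h2a : pvHyp t2 p = 1 := he2.1.symm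
  have h2b : pvHyp t2 q = 0 := he2.2.1.symm
  unfold pvHyp at h1a h1b h2a h2b
  split_ifs at h1a h1b h2a h2b <;> omega

-- ===== VERDICT (by name: the statement is the Claim_ definition above) =====
theorem can_shatter_spec : Claim_equal_can_shatter := by
  intro points _ _
  unfold Spec_can_shatter
  match points with
  | [] => decide
  | [p] =>
    simp only [can_shatter, can_shatter_alt, List.length_cons, List.length_nil,
      pvProduct01, pvFound, pvMatches, pvHyp, List.flatMap, List.map, List.any,
      List.flatten, List.append, List.all, List.zip_cons_cons, List.zip_nil_right]
    set v := (PySem.List.pyGet? p 0).getD 0 with hv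
    split_ifs <;> simp <;> omega
  | p :: q :: rest =>
    rw [can_shatter_two]
    rfl
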